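-- pv_equiv track=rewrite | github.com/cbtaylor/CPSC221 | assignments/ta2.q1.py | find_largest_out_of_place
-- ===== SOURCE A (Python) =====
-- def find_largest_out_of_place(stack):
--     """
--     List -> Int
--
--     Effect: returns index of largest element that has a smaller
--             element below it
--             returns -1 if elements are in order
--
--     >>> A = [1, 4, 3, 2, 5]
--     >>> find_largest_out_of_place(A)
--     1
--
--     >>> B = [3, 5, 6]
--     >>> find_largest_out_of_place(B)
--     -1
--     """
--
--     index_of_max = -1
--     maxnum = 0
--     for i in range(len(stack)-1):
--         if stack[i] > min(stack[i+1:]):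
--             if stack[i] > maxnum:
--                 maxnum = stack[i]
--                 index_of_max = i
--     return index_of_max
-- ===== SOURCE B (Python) =====
-- def find_largest_out_of_place(stack):
--     # One pass from the right builds suffix minima, one pass from the left
--     # picks the first index of the largest out-of-place element.  O(n).
--     suf = []
--     m = None
--     for v in reversed(stack):
--         suf.append(m)
--         m = v if m is None or v < m else m
--     suf.reverse()
--     best_idx, best = -1, None
--     for i, v in enumerate(stack):
--         s = suf[i]
--         if s is not None and v > s and (best is None or v > best):
--             best, best_idx = v, i
--     return best_idx
-- ===== Notes on version B (the rewrite author's own statement) =====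
-- stated objective: faster
-- what changed: Replaced the quadratic loop that recomputes min(stack[i+1:]) for every i by a linear right-to-left suffix-minimum pass followed by a single left-to-right scan, and fixed the maxnum=0 initialisation so non-positive out-of-place elements are found.
-- intended difference: On lists where some element has a smaller element below it but every such element is <= 0 (e.g. [-3,-5]), A returns -1 because it initialises maxnum to 0 instead of -infinity, while B returns the first index of the largest such element (0 here), which is what the docstring ('index of largest element that has a smaller element below it') intends. — e.g. on find_largest_out_of_place([-3, -5]): A returns -1, B returns 0
import Mathlib
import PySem

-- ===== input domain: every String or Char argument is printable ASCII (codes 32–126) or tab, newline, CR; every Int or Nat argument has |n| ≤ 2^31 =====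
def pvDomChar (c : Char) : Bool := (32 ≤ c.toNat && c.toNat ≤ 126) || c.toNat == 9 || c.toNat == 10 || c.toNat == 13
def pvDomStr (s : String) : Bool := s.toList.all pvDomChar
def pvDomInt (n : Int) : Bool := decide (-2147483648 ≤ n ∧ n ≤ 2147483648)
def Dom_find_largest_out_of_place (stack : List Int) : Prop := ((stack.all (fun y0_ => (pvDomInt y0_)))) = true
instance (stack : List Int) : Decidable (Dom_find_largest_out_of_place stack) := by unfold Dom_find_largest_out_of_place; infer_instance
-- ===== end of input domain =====

-- B replaces A's quadratic re-scan min(stack[i+1:]) by one suffix-minimum pass plus one forward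
-- scan (O(n)), and finds non-positive out-of-place elements that A misses (maxnum starts at 0).


-- ===== PORT A =====
-- for i in range(len(stack)-1): if stack[i] > min(stack[i+1:]): if stack[i] > maxnum: update
def find_largest_out_of_place (stack : List Int) : Int :=
  ((PySem.List.pyRange 0 ((stack.length : Int) - 1) 1).foldl
    (fun (st : Int × Int) (i : Int) =>
      match PySem.List.min? (PySem.List.slice stack (some (i + 1)) none) (fun x => x) with
      | none => st   -- unreachable: for every i in range(len-1) the slice stack[i+1:] is nonempty
      | some m =>
        if m < PySem.List.pyGetD stack i 0 then   -- stack[i] is in range for i in range(len-1)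
          if st.2 < PySem.List.pyGetD stack i 0 then (i, PySem.List.pyGetD stack i 0) else st
        else st)
    (-1, 0)).1

-- ===== PORT B =====
-- pass 1: for v in reversed(stack): suf.append(m); m = v if m is None or v < m else m; suf.reverse()
-- pass 2: for i, v in enumerate(stack): if suf[i] is not None and v > suf[i] and (best None or v > best)
-- pass 1 of B: suf[i] = min of stack[i+1:] (None for the last slot), built right-to-left
def pvSuffixMins (stack : List Int) : List (Option Int) :=
  ((stack.reverse.foldl
    (fun (st : List (Option Int) × Option Int) (v : Int) =>
      (st.1 ++ [st.2],
       some (match st.2 with | none => v | some m => if v < m then v else m)))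
    ([], none)).1).reverse

def find_largest_out_of_place_alt (stack : List Int) : Int :=
  ((stack.zipIdx.foldl
    (fun (st : Int × Option Int) (p : Int × Nat) =>
      match (pvSuffixMins stack).getD p.2 none, st.2 with
      | some s, none => if s < p.1 then ((p.2 : Int), some p.1) else st
      | some s, some b => if s < p.1 ∧ b < p.1 then ((p.2 : Int), some p.1) else st
      | none, _ => st)
    (-1, none))).1

-- ===== PRECONDITION & SPEC =====
-- On lists where some element has a strictly smaller element below it but all such elements are
-- ≤ 0, A returns -1 (its maxnum starts at 0, not -infinity) while B returns the first index of
-- the largest such element, which is what the docstring intends.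
def D_find_largest_out_of_place (stack : List Int) : Prop :=
  (∃ j ∈ List.range stack.length, ∃ i ∈ List.range stack.length,
      j < i ∧ stack.getD i 0 < stack.getD j 0) ∧
  (∀ j ∈ List.range stack.length,
      (∃ i ∈ List.range stack.length, j < i ∧ stack.getD i 0 < stack.getD j 0) →
      stack.getD j 0 ≤ 0)
instance (stack : List Int) : Decidable (D_find_largest_out_of_place stack) := by
  unfold D_find_largest_out_of_place; infer_instance

def Spec_find_largest_out_of_place (stack : List Int) (out : Int) : Prop :=
  ¬ D_find_largest_out_of_place stack → out = find_largest_out_of_place_alt stack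
instance (stack : List Int) (out : Int) : Decidable (Spec_find_largest_out_of_place stack out) := by
  unfold Spec_find_largest_out_of_place; infer_instance

def pvDiffWitness_find_largest_out_of_place : List Int := [-3, -5]
def pvDiffWitnessOut_find_largest_out_of_place : Int × Int := (-1, 0)

-- ===== CLAIM (what is proved, stated in full; the proofs are below) =====
def Claim_unchanged_find_largest_out_of_place : Prop := ∀ (stack : List Int), Dom_find_largest_out_of_place stack → Spec_find_largest_out_of_place stack (find_largest_out_of_place stack)
def Claim_changed_find_largest_out_of_place : Prop := Dom_find_largest_out_of_place (pvDiffWitness_find_largest_out_of_place) ∧ D_find_largest_out_of_place (pvDiffWitness_find_largest_out_of_place) ∧ find_largest_out_of_place (pvDiffWitness_find_largest_out_of_place) = pvDiffWitnessOut_find_largest_out_of_place.1 ∧ find_largest_out_of_place_alt (pvDiffWitness_find_largest_out_of_place) = pvDiffWitnessOut_find_largest_out_of_place.2 ∧ pvDiffWitnessOut_find_largest_out_of_place.1 ≠ pvDiffWitnessOut_find_largest_out_of_place.2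
def Claim_exact_find_largest_out_of_place : Prop := ∀ (stack : List Int), Dom_find_largest_out_of_place stack → D_find_largest_out_of_place stack → find_largest_out_of_place stack ≠ find_largest_out_of_place_alt stack

-- ===== LEMMAS AND PROOFS =====

-- pvQual stack j: the loop condition 'stack[j] > min(stack[j+1:])' as a Bool (proof helper)
def pvQual (stack : List Int) (j : Nat) : Bool :=
  match PySem.List.min? (stack.drop (j + 1)) (fun x => x) with
  | none => false
  | some m => decide (m < stack.getD j 0)

-- pvQual agrees with the closed-form condition used by D_
theorem pvQual_iff (stack : List Int) (j : Nat) (hj : j < stack.length) :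
    pvQual stack j = true
      ↔ ∃ i ∈ List.range stack.length, j < i ∧ stack.getD i 0 < stack.getD j 0 := by
  unfold pvQual
  constructor
  · intro h
    cases hm : PySem.List.min? (stack.drop (j + 1)) (fun x => x) with
    | none => rw [hm] at h; simp at h
    | some m =>
      rw [hm] at h
      have hlt : m < stack.getD j 0 := of_decide_eq_true h
      obtain ⟨k, hk, hkm⟩ := List.mem_iff_getElem.mp (PySem.List.min?_mem hm)
      have hklen : k < stack.length - (j + 1) := by simpa using hk
      refine ⟨j + 1 + k, List.mem_range.mpr (by omega), by omega, ?_⟩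
      rw [List.getD_eq_getElem _ _ (by omega : j + 1 + k < stack.length)]
      rw [show stack[j + 1 + k] = m from by rw [← List.getElem_drop]; exact hkm]
      exact hlt
  · rintro ⟨i, hilen, hji, hlt⟩
    have hilen := List.mem_range.mp hilen
    cases hm : PySem.List.min? (stack.drop (j + 1)) (fun x => x) with
    | none =>
      exfalso
      have : stack.drop (j + 1) = [] := (PySem.List.min?_eq_none_iff _ _).mp hm
      have : stack.length - (j + 1) = 0 := by
        simpa using congrArg List.length this
      omega
    | some m =>
      have hmem : stack.getD i 0 ∈ stack.drop (j + 1) := by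
        rw [List.getD_eq_getElem _ _ hilen]
        apply List.mem_iff_getElem.mpr
        refine ⟨i - (j + 1), by simp; omega, ?_⟩
        rw [List.getElem_drop]
        congr 1
        omega
      have := PySem.List.min?_isMin hm _ hmem
      exact decide_eq_true (by omega : m < stack.getD j 0)


-- the loop bodies of the two ports, rewritten over a Nat index (proved equal to the ports below)
def pvAStep (stack : List Int) (st : Int × Int) (k : Nat) : Int × Int :=
  match PySem.List.min? (stack.drop (k + 1)) (fun x => x) with
  | none => st
  | some m =>
    if m < stack.getD k 0 then
      if st.2 < stack.getD k 0 then ((k : Int), stack.getD k 0) else st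
    else st

def pvBStep (stack : List Int) (st : Int × Option Int) (k : Nat) : Int × Option Int :=
  match PySem.List.min? (stack.drop (k + 1)) (fun x => x), st.2 with
  | some s, none => if s < stack.getD k 0 then ((k : Int), some (stack.getD k 0)) else st
  | some s, some b => if s < stack.getD k 0 ∧ b < stack.getD k 0 then ((k : Int), some (stack.getD k 0)) else st
  | none, _ => st

-- joint loop invariant after the first k indices have been processed
def pvInv (stack : List Int) (k : Nat) (a : Int × Int) (b : Int × Option Int) : Prop :=
  (b.2 = none → a = (-1, 0) ∧ b = (-1, none) ∧ ∀ j, j < k → ¬ pvQual stack j = true) ∧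
  (∀ bv, b.2 = some bv →
    (∃ j, j < k ∧ pvQual stack j = true ∧ stack.getD j 0 = bv ∧ b.1 = (j : Int)) ∧
    (∀ j, j < k → pvQual stack j = true → stack.getD j 0 ≤ bv) ∧
    ((bv ≤ 0 ∧ a = (-1, 0)) ∨ (0 < bv ∧ a = (b.1, bv))))

theorem pvInv_zero (stack : List Int) : pvInv stack 0 (-1, 0) (-1, none) := by
  constructor
  · intro _; exact ⟨rfl, rfl, fun j hj => absurd hj (Nat.not_lt_zero j)⟩
  · intro _ h; simp at h

theorem pvInv_step (stack : List Int) (k : Nat) (a : Int × Int) (b : Int × Option Int)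
    (h : pvInv stack k a b) :
    pvInv stack (k + 1) (pvAStep stack a k) (pvBStep stack b k) := by
  obtain ⟨hnone, hsome⟩ := h
  have hlt : ∀ j, j < k + 1 → j < k ∨ j = k := fun j hj => Nat.lt_succ_iff_lt_or_eq.mp hj
  unfold pvAStep pvBStep
  cases hb : b.2 with
  | none =>
    obtain ⟨ha, hb', hq⟩ := hnone hb
    cases hmin : PySem.List.min? (stack.drop (k + 1)) (fun x => x) with
    | none =>
      have hqk : pvQual stack k = false := by unfold pvQual; rw [hmin]
      dsimp only
      exact ⟨fun _ => ⟨ha, hb', fun j hj => (hlt j hj).elim (hq j) (fun h' => by subst h'; simp [hqk])⟩,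
             fun bv hbv => by rw [hb] at hbv; simp at hbv⟩
    | some m =>
      have hqk : pvQual stack k = (decide (m < stack.getD k 0)) := by unfold pvQual; rw [hmin]
      dsimp only
      by_cases hmv : m < stack.getD k 0
      · rw [if_pos hmv, if_pos hmv]
        constructor
        · intro h'; simp at h'
        · intro bv hbv; simp only [Option.some.injEq] at hbv; subst hbv
          refine ⟨⟨k, Nat.lt_succ_self k, hqk.trans (decide_eq_true hmv), rfl, rfl⟩, ?_, ?_⟩
          · intro j hj hq'
            rcases hlt j hj with h' | h'
            · exact absurd hq' (hq j h')
            · subst h'; exact le_refl _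
          · rw [ha]
            by_cases h0 : (0 : Int) < stack.getD k 0
            · right; rw [if_pos h0]; exact ⟨h0, rfl⟩
            · left; rw [if_neg h0]; exact ⟨le_of_not_gt h0, rfl⟩
      · rw [if_neg hmv, if_neg hmv]
        refine ⟨fun _ => ⟨ha, hb', fun j hj => ?_⟩,
                fun bv hbv => by rw [hb] at hbv; simp at hbv⟩
        rcases hlt j hj with h' | h'
        · exact hq j h'
        · subst h'; intro h''; exact hmv (of_decide_eq_true (hqk ▸ h''))
  | some bv =>
    obtain ⟨hex, hmax, hrel⟩ := hsome bv hb
    obtain ⟨j0, hj0, hq0, hv0, hb1⟩ := hex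
    cases hmin : PySem.List.min? (stack.drop (k + 1)) (fun x => x) with
    | none =>
      have hqk : pvQual stack k = false := by unfold pvQual; rw [hmin]
      dsimp only
      refine ⟨fun h' => by rw [hb] at h'; simp at h', fun bv' hbv' => ?_⟩
      rw [hb] at hbv'; simp only [Option.some.injEq] at hbv'; subst hbv'
      refine ⟨⟨j0, Nat.lt_succ_of_lt hj0, hq0, hv0, hb1⟩, fun j hj hq' => ?_, hrel⟩
      rcases hlt j hj with h' | h'
      · exact hmax j h' hq'
      · subst h'; simp [hqk] at hq'
    | some m =>
      have hqk : pvQual stack k = (decide (m < stack.getD k 0)) := by unfold pvQual; rw [hmin]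
      dsimp only
      by_cases hmv : m < stack.getD k 0
      · by_cases hup : bv < stack.getD k 0
        · rw [if_pos hmv, if_pos (show m < stack.getD k 0 ∧ bv < stack.getD k 0 from ⟨hmv, hup⟩)]
          constructor
          · intro h'; simp at h'
          · intro bv' hbv'; simp only [Option.some.injEq] at hbv'; subst hbv'
            refine ⟨⟨k, Nat.lt_succ_self k, hqk.trans (decide_eq_true hmv), rfl, rfl⟩, ?_, ?_⟩
            · intro j hj hq'
              rcases hlt j hj with h' | h'
              · exact le_of_lt (lt_of_le_of_lt (hmax j h' hq') hup)
              · subst h'; exact le_refl _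
            · rcases hrel with ⟨hbv0, ha⟩ | ⟨hbv0, ha⟩
              · rw [ha]; simp only
                by_cases h0 : (0 : Int) < stack.getD k 0
                · right; rw [if_pos h0]; exact ⟨h0, rfl⟩
                · left; rw [if_neg h0]; exact ⟨le_of_not_gt h0, rfl⟩
              · rw [ha]; simp only
                rw [if_pos hup]
                right; exact ⟨lt_trans hbv0 hup, rfl⟩
        · rw [if_pos hmv, if_neg (show ¬ (m < stack.getD k 0 ∧ bv < stack.getD k 0) from fun h' => hup h'.2)]
          refine ⟨fun h' => by rw [hb] at h'; simp at h', fun bv' hbv' => ?_⟩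
          rw [hb] at hbv'; simp only [Option.some.injEq] at hbv'; subst hbv'
          refine ⟨⟨j0, Nat.lt_succ_of_lt hj0, hq0, hv0, hb1⟩, ?_, ?_⟩
          · intro j hj hq'
            rcases hlt j hj with h' | h'
            · exact hmax j h' hq'
            · subst h'; exact le_of_not_gt hup
          · have hvb : stack.getD k 0 ≤ bv := le_of_not_gt hup
            rcases hrel with ⟨hbv0, ha⟩ | ⟨hbv0, ha⟩
            · have hA : ¬ a.2 < stack.getD k 0 := by
                rw [ha]; exact not_lt.mpr (by omega)
              left; rw [if_neg hA]; exact ⟨hbv0, ha⟩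
            · have hA : ¬ a.2 < stack.getD k 0 := by rw [ha]; exact hup
              right; rw [if_neg hA]; exact ⟨hbv0, ha⟩
      · rw [if_neg hmv, if_neg (show ¬ (m < stack.getD k 0 ∧ bv < stack.getD k 0) from fun h' => hmv h'.1)]
        refine ⟨fun h' => by rw [hb] at h'; simp at h', fun bv' hbv' => ?_⟩
        rw [hb] at hbv'; simp only [Option.some.injEq] at hbv'; subst hbv'
        refine ⟨⟨j0, Nat.lt_succ_of_lt hj0, hq0, hv0, hb1⟩, fun j hj hq' => ?_, hrel⟩
        rcases hlt j hj with h' | h'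
        · exact hmax j h' hq'
        · subst h'; exact absurd (of_decide_eq_true (hqk ▸ hq')) hmv


-- characterisation of B's suffix-minimum pass
def pvSufFold (l : List Int) : List (Option Int) × Option Int :=
  l.foldr (fun (v : Int) (st : List (Option Int) × Option Int) =>
    (st.1 ++ [st.2],
     some (match st.2 with | none => v | some m => if v < m then v else m))) ([], none)

theorem pvSufFold_snd : ∀ l : List Int, (pvSufFold l).2 = PySem.List.min? l (fun x => x)
  | [] => by simp [pvSufFold, PySem.List.min?]
  | x :: t => by
    have ih := pvSufFold_snd t
    have h1 : (pvSufFold (x :: t)).2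
        = some (match (pvSufFold t).2 with | none => x | some m => if x < m then x else m) := rfl
    rw [h1, ih]
    cases t with
    | nil => simp [PySem.List.min?]
    | cons y s =>
      rw [PySem.List.min?_id_cons, PySem.List.min?_id_cons]
      simp only [List.foldl_cons, Option.some.injEq]
      rw [List.foldl_assoc]
      rw [min_def]
      split_ifs <;> omega

theorem pvSufFold_fst : ∀ l : List Int,
    (pvSufFold l).1.reverse
      = (List.range l.length).map (fun i => PySem.List.min? (l.drop (i + 1)) (fun x => x))
  | [] => rfl
  | x :: t => by
    have h1 : (pvSufFold (x :: t)).1 = (pvSufFold t).1 ++ [(pvSufFold t).2] := rfl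
    rw [h1, List.reverse_append, List.reverse_singleton, List.singleton_append,
        pvSufFold_snd t, pvSufFold_fst t]
    rw [show (x :: t).length = t.length + 1 from rfl, List.range_succ_eq_map, List.map_cons,
        List.map_map]
    rfl

-- port A as a fold of pvAStep over Nat indices
theorem pvA_eq (stack : List Int) :
    find_largest_out_of_place stack
      = ((List.range (stack.length - 1)).foldl (pvAStep stack) (-1, 0)).1 := by
  unfold find_largest_out_of_place
  rw [PySem.List.pyRange_one]
  rw [show (((stack.length : Int) - 1) - 0).toNat = stack.length - 1 from by omega]
  rw [List.foldl_map]
  apply congrArg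
  apply PySem.List.foldl_congr_mem
  intro st k _
  unfold pvAStep
  rw [show (0 : Int) + (k : Int) + 1 = ((k + 1 : Nat) : Int) from by push_cast; ring]
  rw [PySem.List.slice_from_natCast]
  rw [show (0 : Int) + (k : Int) = ((k : Nat) : Int) from by ring]
  rw [PySem.List.pyGetD_natCast]

-- port B as a fold of pvBStep over Nat indices
theorem pvZipIdx (l : List Int) :
    l.zipIdx = (List.range l.length).map (fun i => (l.getD i 0, i)) := by
  apply List.ext_getElem
  · simp
  · intro i h1 h2
    have h3 : i < l.length := by simpa using h1
    simp [List.getElem_zipIdx, List.getD_eq_getElem?_getD, List.getElem?_eq_getElem h3]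

theorem pvB_eq (stack : List Int) :
    find_largest_out_of_place_alt stack
      = ((List.range stack.length).foldl (pvBStep stack) (-1, none)).1 := by
  have hsuf : pvSuffixMins stack
      = (List.range stack.length).map (fun i => PySem.List.min? (stack.drop (i + 1)) (fun x => x)) := by
    unfold pvSuffixMins
    rw [List.foldl_reverse]
    exact pvSufFold_fst stack
  unfold find_largest_out_of_place_alt
  rw [hsuf, pvZipIdx stack, List.foldl_map]
  apply congrArg
  apply PySem.List.foldl_congr_mem
  intro st i hi
  rw [List.mem_range] at hi
  unfold pvBStep
  rw [PySem.List.getD_map_range _ _ _ _ hi]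

-- the last loop index is a no-op for both folds (the suffix there is empty)
theorem pvMin_last (stack : List Int) (h : stack ≠ []) :
    PySem.List.min? (stack.drop (stack.length - 1 + 1)) (fun x => x) = none := by
  have hpos : 0 < stack.length := List.length_pos_iff.mpr h
  rw [show stack.length - 1 + 1 = stack.length from by omega, List.drop_length]
  simp [PySem.List.min?]

theorem pvA_trim (stack : List Int) (init : Int × Int) (h : stack ≠ []) :
    (List.range stack.length).foldl (pvAStep stack) init
      = (List.range (stack.length - 1)).foldl (pvAStep stack) init := by
  have hpos : 0 < stack.length := List.length_pos_iff.mpr h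
  rw [show List.range stack.length = List.range (stack.length - 1) ++ [stack.length - 1] from by
        rw [← List.range_succ]; congr 1; omega]
  rw [List.foldl_append]
  simp only [List.foldl_cons, List.foldl_nil]
  unfold pvAStep
  rw [pvMin_last stack h]

theorem pvInv_range (stack : List Int) :
    ∀ k, pvInv stack k ((List.range k).foldl (pvAStep stack) (-1, 0))
      ((List.range k).foldl (pvBStep stack) (-1, none))
  | 0 => pvInv_zero stack
  | k + 1 => by
    rw [List.range_succ, List.foldl_append, List.foldl_append]
    simpa using pvInv_step stack k _ _ (pvInv_range stack k)

-- ===== VERDICT (by name: the statement is the Claim_ definition above) =====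
theorem find_largest_out_of_place_spec : Claim_unchanged_find_largest_out_of_place := by
  unfold Claim_unchanged_find_largest_out_of_place
  intro stack _
  unfold Spec_find_largest_out_of_place
  intro hND
  rw [pvA_eq, pvB_eq]
  rcases eq_or_ne stack [] with hst | hst
  · subst hst; rfl
  · rw [← pvA_trim stack (-1, 0) hst]
    obtain ⟨hnone, hsome⟩ := pvInv_range stack stack.length
    cases hb : ((List.range stack.length).foldl (pvBStep stack) (-1, none)).2 with
    | none =>
      obtain ⟨ha, hbeq, _⟩ := hnone hb
      rw [ha, hbeq]
    | some bv =>
      obtain ⟨⟨j, hj, hqj, hvj, hb1⟩, hmax, hrel⟩ := hsome bv hb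
      rcases hrel with ⟨hbv0, ha⟩ | ⟨hbv0, ha⟩
      · exfalso
        apply hND
        unfold D_find_largest_out_of_place
        refine ⟨⟨j, List.mem_range.mpr hj, (pvQual_iff stack j hj).mp hqj⟩, fun j' hj' hq' => ?_⟩
        have hj'n := List.mem_range.mp hj'
        have := hmax j' hj'n ((pvQual_iff stack j' hj'n).mpr hq')
        omega
      · rw [ha]

theorem find_largest_out_of_place_changed : Claim_changed_find_largest_out_of_place := by
  unfold Claim_changed_find_largest_out_of_place; decide

theorem find_largest_out_of_place_tight : Claim_exact_find_largest_out_of_place := by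
  unfold Claim_exact_find_largest_out_of_place
  intro stack _ hD
  obtain ⟨⟨j, hjmem, hqj'⟩, hall⟩ := hD
  have hj := List.mem_range.mp hjmem
  have hqj : pvQual stack j = true := (pvQual_iff stack j hj).mpr hqj'
  have hst : stack ≠ [] := by
    intro h; subst h; simp at hj
  rw [pvA_eq, pvB_eq, ← pvA_trim stack (-1, 0) hst]
  obtain ⟨hnone, hsome⟩ := pvInv_range stack stack.length
  cases hb : ((List.range stack.length).foldl (pvBStep stack) (-1, none)).2 with
  | none =>
    obtain ⟨_, _, hq⟩ := hnone hb
    exact absurd hqj (hq j hj)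
  | some bv =>
    obtain ⟨⟨j0, hj0, hq0, hv0, hb1⟩, hmax, hrel⟩ := hsome bv hb
    rcases hrel with ⟨hbv0, ha⟩ | ⟨hbv0, ha⟩
    · rw [ha, hb1]
      have := Int.natCast_nonneg j0
      intro hcontr
      simp at hcontr
    · exfalso
      have hle := hall j0 (List.mem_range.mpr hj0) ((pvQual_iff stack j0 hj0).mp hq0)
      omega
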